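-- pv_equiv track=rewrite | github.com/SmittGevariya/AutoPPT-Generator | Text_to_ppt.py | condense_content
-- ===== SOURCE A (Python) =====
-- def condense_content(content, max_slides):
--     condensed_content = []
--     for paragraph in content:
--         points = paragraph.split('. ')  # Split by sentences
--         condensed_content.extend(points[:3])  # Take first 3 sentences as bullet points
--         if len(condensed_content) >= max_slides * 3:  # Ensure slide count limit
--             break
--     return [condensed_content[i:i + 3] for i in range(0, len(condensed_content), 3)][:max_slides]
-- ===== SOURCE B (Python) =====
-- def condense_content(content, max_slides):
--     slides = []
--     current = []
--     count = 0
--     for paragraph in content: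
--         for sentence in paragraph.split('. ')[:3]:
--             current.append(sentence)
--             count += 1
--             if len(current) == 3:
--                 slides.append(current)
--                 current = []
--         if count >= max_slides * 3:
--             break
--     if current:
--         slides.append(current)
--     return slides[:max_slides]
-- ===== Notes on version B (the rewrite author's own statement) =====
-- stated objective: alternative
-- what changed: A flattens all kept sentences into one list and then chunks it with a slice comprehension; B is a single fused pass that buffers sentences in a `current` group and emits each group of 3 as it fills, appending the trailing partial group at the end.
import Mathlib
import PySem

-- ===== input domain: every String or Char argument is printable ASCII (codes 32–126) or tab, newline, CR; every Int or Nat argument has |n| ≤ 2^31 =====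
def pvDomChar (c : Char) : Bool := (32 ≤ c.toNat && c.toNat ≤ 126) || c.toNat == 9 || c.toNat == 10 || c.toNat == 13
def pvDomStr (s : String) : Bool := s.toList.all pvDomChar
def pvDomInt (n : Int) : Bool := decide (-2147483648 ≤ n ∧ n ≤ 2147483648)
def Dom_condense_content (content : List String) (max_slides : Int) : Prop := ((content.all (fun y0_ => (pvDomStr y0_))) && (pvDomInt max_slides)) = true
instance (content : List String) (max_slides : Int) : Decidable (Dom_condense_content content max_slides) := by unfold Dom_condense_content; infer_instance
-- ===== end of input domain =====

-- B fuses A's flatten-then-chunk into one buffered pass (slides/current/count); same return value, objective: alternative decomposition.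

-- paragraph.split('. '): PySem.Str.split? is `some` whenever the separator is nonempty, so getD [] never fires
def pySplitDot (p : String) : List String := (PySem.Str.split? p ". ").getD []

-- ===== PORT A =====
-- the for-loop of A: accumulate sentences, break once len(condensed_content) >= max_slides * 3
def condense_loop_A (m : Int) : List String → List String → List String
  | [], acc => acc
  | p :: rest, acc =>
    let points := pySplitDot p
    let acc' := acc ++ PySem.List.slice points none (some 3)   -- points[:3]
    if (acc'.length : Int) ≥ m * 3 then acc' else condense_loop_A m rest acc'

def condense_content (content : List String) (max_slides : Int) : List (List String) :=
  let condensed := condense_loop_A max_slides content []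
  -- [condensed[i:i+3] for i in range(0, len(condensed), 3)][:max_slides]
  PySem.List.slice
    ((PySem.List.pyRange 0 (condensed.length : Int) 3).map
      (fun i => PySem.List.slice condensed (some i) (some (i + 3))))
    none (some max_slides)

-- ===== PORT B =====
-- inner for-loop of B: append each sentence to current, push current when it reaches 3
def condense_inner_B : List String → List (List String) → List String → Int → (List (List String) × List String × Int)
  | [], slides, current, count => (slides, current, count)
  | s :: rest, slides, current, count =>
    let current' := current ++ [s]
    let count' := count + 1
    if current'.length == 3 then condense_inner_B rest (slides ++ [current']) [] count'
    else condense_inner_B rest slides current' count'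

-- outer for-loop of B: break after a paragraph once count >= max_slides * 3
def condense_loop_B (m : Int) : List String → List (List String) → List String → Int → (List (List String) × List String)
  | [], slides, current, _ => (slides, current)
  | p :: rest, slides, current, count =>
    let r := condense_inner_B (PySem.List.slice (pySplitDot p) none (some 3)) slides current count
    if r.2.2 ≥ m * 3 then (r.1, r.2.1) else condense_loop_B m rest r.1 r.2.1 r.2.2

def condense_content_alt (content : List String) (max_slides : Int) : List (List String) :=
  let r := condense_loop_B max_slides content [] [] 0
  let slides := if r.2 = [] then r.1 else r.1 ++ [r.2]   -- if current: slides.append(current)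
  PySem.List.slice slides none (some max_slides)          -- slides[:max_slides]

-- ===== PRECONDITION & SPEC =====
def Spec_condense_content (content : List String) (max_slides : Int) (out : List (List String)) : Prop := out = condense_content_alt content max_slides
instance (content : List String) (max_slides : Int) (out : List (List String)) : Decidable (Spec_condense_content content max_slides out) := by unfold Spec_condense_content; infer_instance

-- ===== CLAIM (what is proved, stated in full; the proofs are below) =====
def Claim_equal_condense_content : Prop := ∀ (content : List String) (max_slides : Int), Dom_condense_content content max_slides → Spec_condense_content content max_slides (condense_content content max_slides)

-- ===== LEMMAS AND PROOFS =====

-- the groups-of-3 chunking, as a recursive function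
def chunk3 {α : Type} : List α → List (List α)
  | [] => []
  | a :: rest => (a :: rest.take 2) :: chunk3 (rest.drop 2)
termination_by l => l.length
decreasing_by simp

-- A's chunking comprehension computes chunk3
theorem rangeMap_eq_chunk3 {α : Type} (l : List α) :
    (List.range ((l.length + 2) / 3)).map (fun k => (l.drop (3 * k)).take 3) = chunk3 l := by
  fun_induction chunk3 l with
  | case1 => simp
  | case2 a rest ih =>
    have hK : ((a :: rest).length + 2) / 3 = ((rest.drop 2).length + 2) / 3 + 1 := by
      simp; omega
    rw [hK, List.range_succ_eq_map, List.map_cons, List.map_map]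
    refine congrArg₂ List.cons (by simp) ?_
    rw [← ih]
    apply List.map_congr_left
    intro k hk
    have hd : (a :: rest).drop (3 * (k + 1)) = (rest.drop 2).drop (3 * k) := by
      rw [List.drop_drop]
      have h31 : 3 * (k + 1) = (3 * k + 2) + 1 := by omega
      rw [h31, List.drop_succ_cons]
      congr 1
      omega
    simp only [Function.comp]
    rw [hd]

theorem comp_eq_chunk3 {α : Type} (l : List α) :
    (PySem.List.pyRange 0 (l.length : Int) 3).map
      (fun i => PySem.List.slice l (some i) (some (i + 3))) = chunk3 l := by
  rw [PySem.List.pyRange_of_pos 0 (l.length : Int) (by norm_num)]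
  have hK : (if (0:Int) < (l.length : Int) then (((l.length : Int) - 0 + 3 - 1) / 3).toNat else 0)
      = (l.length + 2) / 3 := by
    split <;> omega
  rw [hK, List.map_map, ← rangeMap_eq_chunk3]
  apply List.map_congr_left
  intro k hk
  simp only [Function.comp]
  have h1 : (0 : Int) + 3 * (k : Int) = ((3 * k : Nat) : Int) := by push_cast; ring
  have h2 : (0 : Int) + 3 * (k : Int) + 3 = ((3 * k : Nat) : Int) + ((3 : Nat) : Int) := by push_cast; ring
  rw [h2, h1, PySem.List.slice_natCast_add]

theorem chunk3_small {α : Type} (l : List α) (h : l.length < 3) :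
    chunk3 l = if l = [] then [] else [l] := by
  match l, h with
  | [], _ => simp [chunk3]
  | [a], _ => simp [chunk3]
  | [a, b], _ => simp [chunk3]

theorem chunk3_flatten (s : List (List String)) (t : List String)
    (hs : ∀ x ∈ s, x.length = 3) :
    chunk3 (s.flatten ++ t) = s ++ chunk3 t := by
  induction s with
  | nil => simp
  | cons x xs ih =>
    have hx3 : x.length = 3 := hs x (by simp)
    obtain ⟨a, b, c, rfl⟩ := List.length_eq_three.1 hx3
    have ih' := ih (fun y hy => hs y (by simp [hy]))
    simp only [List.flatten_cons, List.cons_append, List.append_assoc]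
    rw [chunk3]
    simp only [List.drop_succ_cons, List.drop_zero, List.nil_append]
    rw [ih']
    simp

theorem flatten_len3 (s : List (List String)) (hs : ∀ x ∈ s, x.length = 3) :
    s.flatten.length = 3 * s.length := by
  induction s with
  | nil => simp
  | cons x xs ih =>
    have := hs x (by simp)
    simp [ih (fun y hy => hs y (by simp [hy])), this]
    omega

theorem inner_spec (pts : List String) : ∀ (slides : List (List String)) (current : List String) (count : Int),
    current.length < 3 → (∀ x ∈ slides, x.length = 3) → count = 3 * slides.length + current.length →
    (condense_inner_B pts slides current count).1.flatten ++ (condense_inner_B pts slides current count).2.1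
        = slides.flatten ++ current ++ pts
      ∧ (condense_inner_B pts slides current count).2.1.length < 3
      ∧ (∀ x ∈ (condense_inner_B pts slides current count).1, x.length = 3)
      ∧ (condense_inner_B pts slides current count).2.2
        = 3 * (condense_inner_B pts slides current count).1.length + (condense_inner_B pts slides current count).2.1.length := by
  induction pts with
  | nil =>
    intro slides current count h1 h2 h3
    simpa [condense_inner_B] using ⟨h1, h2, h3⟩
  | cons s rest ih =>
    intro slides current count h1 h2 h3
    by_cases hc : (current ++ [s]).length = 3
    · have hx : ∀ x ∈ slides ++ [current ++ [s]], x.length = 3 := by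
        intro x hx
        rcases List.mem_append.1 hx with h | h
        · exact h2 x h
        · simp at h; simp [h, hc]
      have hc2 : current.length = 2 := by
        have hcc := hc; simp at hcc; omega
      have H := ih (slides ++ [current ++ [s]]) [] (count + 1) (by simp) hx (by simp; omega)
      simp only [condense_inner_B, hc, beq_self_eq_true, if_pos]
      refine ⟨?_, H.2.1, H.2.2.1, H.2.2.2⟩
      rw [H.1]
      simp [List.append_assoc]
    · have hlt : (current ++ [s]).length < 3 := by simp at hc ⊢; omega
      have H := ih slides (current ++ [s]) (count + 1) hlt h2 (by simp at hc ⊢; omega)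
      have hbeq : ((current ++ [s]).length == 3) = false := by simpa using hc
      simp only [condense_inner_B, hbeq, Bool.false_eq_true, if_false]
      refine ⟨?_, H.2.1, H.2.2.1, H.2.2.2⟩
      rw [H.1]
      simp [List.append_assoc]

theorem loop_spec (m : Int) (content : List String) : ∀ (slides : List (List String)) (current : List String) (count : Int),
    current.length < 3 → (∀ x ∈ slides, x.length = 3) → count = 3 * slides.length + current.length →
    chunk3 (condense_loop_A m content (slides.flatten ++ current))
      = (if (condense_loop_B m content slides current count).2 = []
          then (condense_loop_B m content slides current count).1
          else (condense_loop_B m content slides current count).1 ++ [(condense_loop_B m content slides current count).2]) := by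
  induction content with
  | nil =>
    intro slides current count h1 h2 h3
    rw [condense_loop_A, condense_loop_B, chunk3_flatten slides current h2, chunk3_small current h1]
    split <;> simp
  | cons p rest ih =>
    intro slides current count h1 h2 h3
    have H := inner_spec (PySem.List.slice (pySplitDot p) none (some 3)) slides current count h1 h2 h3
    set r := condense_inner_B (PySem.List.slice (pySplitDot p) none (some 3)) slides current count with hr
    have hacc : slides.flatten ++ current ++ PySem.List.slice (pySplitDot p) none (some 3)
        = r.1.flatten ++ r.2.1 := H.1.symm
    have hlen : ((r.1.flatten ++ r.2.1).length : Int) = r.2.2 := by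
      rw [List.length_append, flatten_len3 r.1 H.2.2.1, H.2.2.2]
      push_cast
      ring
    rw [condense_loop_A, condense_loop_B]
    simp only [← hr, List.append_assoc] at *
    rw [hacc, hlen]
    by_cases hbr : r.2.2 ≥ m * 3
    · rw [if_pos hbr, if_pos hbr]
      rw [chunk3_flatten r.1 r.2.1 H.2.2.1, chunk3_small r.2.1 H.2.1]
      split <;> simp
    · rw [if_neg hbr, if_neg hbr]
      exact ih r.1 r.2.1 r.2.2 H.2.1 H.2.2.1 H.2.2.2

-- ===== VERDICT (by name: the statement is the Claim_ definition above) =====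
theorem condense_content_spec : Claim_equal_condense_content := by
  intro content m _
  unfold Spec_condense_content condense_content condense_content_alt
  dsimp only
  rw [comp_eq_chunk3]
  have h := loop_spec m content [] [] 0 (by simp) (by simp) (by simp)
  simp only [List.flatten_nil, List.nil_append] at h
  rw [h]
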